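-- pv_equiv track=rewrite | github.com/samensah/encoders_towe_emnlp2021 | evals.py | tag2ts
-- ===== SOURCE A (Python) =====
-- def tag2ts(ts_tag_sequence, ts_tag_vocab):
--
--     ts_tag_vocab_ = {ts_tag_vocab[key]:key for key in ts_tag_vocab.keys()}
--
--     n_tags = len(ts_tag_sequence)
--     ts_sequence = []
--     begin, end = -1, -1
--     for i in range(n_tags):
--         ts_tag = ts_tag_sequence[i]
--         ts_tag = ts_tag_vocab_[ts_tag]
--
--         if ts_tag == 'B':
--             if begin != -1:
--                 end = i -1
--                 if end >= begin > -1: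
--                     ts_sequence.append((begin, end))
--                     begin, end = -1, -1
--                 else:
--                     begin, end = -1, -1
--
--             begin = i
--             end = i
--         elif ts_tag == 'O':
--             end = i-1
--             if end >= begin > -1:
--                 ts_sequence.append((begin, end))
--                 begin, end = -1, -1
--             else:
--                 begin, end = -1, -1
--         elif ts_tag == 'I':
--             end = i
--
--     if end >= begin > -1:
--         ts_sequence.append((begin, end))
--
--     return ts_sequence
-- ===== SOURCE B (Python) =====
-- def tag2ts(ts_tag_sequence, ts_tag_vocab):
--     # Decode first, then emit spans run-by-run: each 'B' opens a span that is
--     # closed at the next 'B'/'O' (at closer-1) or, at end of sequence, at the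
--     # last 'I' seen (or at the 'B' itself).
--     inv = {v: k for k, v in ts_tag_vocab.items()}
--     names = [inv[t] for t in ts_tag_sequence]
--     n = len(names)
--     spans = []
--     i = 0
--     while i < n:
--         if names[i] != 'B':
--             i += 1
--             continue
--         j, e = i + 1, i
--         while j < n and names[j] not in ('B', 'O'):
--             if names[j] == 'I':
--                 e = j
--             j += 1
--         spans.append((i, j - 1) if j < n else (i, e))
--         i = j if j < n and names[j] == 'B' else j + 1
--     return spans
-- ===== Notes on version B (the rewrite author's own statement) =====
-- stated objective: simpler
-- what changed: Replaces the begin/end sentinel state machine carried across iterations with a decode-then-scan pass: each 'B' opens a span that an inner scan closes at the next 'B'/'O' (or at the last 'I' before the end), emitting the span where the run ends.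
import Mathlib
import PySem

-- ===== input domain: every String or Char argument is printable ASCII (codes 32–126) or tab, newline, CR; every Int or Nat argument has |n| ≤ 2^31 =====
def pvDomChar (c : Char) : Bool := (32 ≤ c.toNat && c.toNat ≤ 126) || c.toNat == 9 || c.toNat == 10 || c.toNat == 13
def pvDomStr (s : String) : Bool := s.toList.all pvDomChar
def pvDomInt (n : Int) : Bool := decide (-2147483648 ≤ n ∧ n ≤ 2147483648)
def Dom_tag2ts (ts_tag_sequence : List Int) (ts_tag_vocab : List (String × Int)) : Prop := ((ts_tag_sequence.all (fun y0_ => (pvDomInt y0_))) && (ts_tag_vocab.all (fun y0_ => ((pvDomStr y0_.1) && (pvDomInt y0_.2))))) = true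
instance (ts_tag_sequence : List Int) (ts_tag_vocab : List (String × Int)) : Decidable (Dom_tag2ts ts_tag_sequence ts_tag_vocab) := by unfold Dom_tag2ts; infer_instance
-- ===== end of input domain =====

-- B replaces A's begin/end sentinel state machine by a decode-then-scan pass that emits each span
-- where its run ends (objective: simpler).

-- ===== PORT A =====
-- Literal port of A: invert the vocab, then a single indexed loop carrying (spans, begin, end),
-- with the final trailing-span check.  Where Python raises KeyError (tag not a vocab value) the
-- lookup defaults to "" — those inputs are excluded by Pre_tag2ts.
def tag2ts (ts_tag_sequence : List Int) (ts_tag_vocab : List (String × Int)) : List (Int × Int) :=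
  let inv : PySem.Dict Int String :=
    ts_tag_vocab.foldl (fun d kv => d.insert kv.2 kv.1) PySem.Dict.empty
  let n : Int := PySem.List.len ts_tag_sequence
  let st :=
    (PySem.List.pyRange 0 n 1).foldl
      (fun (st : List (Int × Int) × Int × Int) i =>
        let acc := st.1
        let b := st.2.1
        let e := st.2.2
        let tag := PySem.Dict.getD inv (PySem.List.pyGetD ts_tag_sequence i 0) ""
        if tag = "B" then
          if b ≠ -1 then
            (if i - 1 ≥ b ∧ b > -1 then acc ++ [(b, i - 1)] else acc, i, i)
          else (acc, i, i)
        else if tag = "O" then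
          (if i - 1 ≥ b ∧ b > -1 then acc ++ [(b, i - 1)] else acc, (-1 : Int), (-1 : Int))
        else if tag = "I" then (acc, b, i)
        else (acc, b, e))
      ([], -1, -1)
  if st.2.2 ≥ st.2.1 ∧ st.2.1 > -1 then st.1 ++ [(st.2.1, st.2.2)] else st.1

-- ===== PORT B =====
-- B-side helpers: the outer index walk (pvAltGo) and the inner run scan (pvOpen) of Source B,
-- rendered as structural recursion over the enumerated name list.
mutual
def pvAltGo : List (Int × String) → List (Int × Int)
  | [] => []
  | (i, t) :: rest => if t = "B" then pvOpen i i rest else pvAltGo rest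

def pvOpen (b e : Int) : List (Int × String) → List (Int × Int)
  | [] => [(b, e)]
  | (j, t) :: rest =>
    if t = "B" then (b, j - 1) :: pvOpen j j rest
    else if t = "O" then (b, j - 1) :: pvAltGo rest
    else if t = "I" then pvOpen b j rest
    else pvOpen b e rest
end

def tag2ts_alt (ts_tag_sequence : List Int) (ts_tag_vocab : List (String × Int)) : List (Int × Int) :=
  let inv : PySem.Dict Int String :=
    ts_tag_vocab.foldl (fun d kv => d.insert kv.2 kv.1) PySem.Dict.empty
  let names := ts_tag_sequence.map (fun t => PySem.Dict.getD inv t "")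
  pvAltGo (PySem.List.enumerate names 0)

-- ===== PRECONDITION & SPEC =====
-- Pre_ excludes exactly the inputs where Python A raises KeyError: a tag in the sequence that is
-- not a value of the vocab.
def Pre_tag2ts (ts_tag_sequence : List Int) (ts_tag_vocab : List (String × Int)) : Prop :=
  ∀ t ∈ ts_tag_sequence, t ∈ ts_tag_vocab.map Prod.snd
instance (ts_tag_sequence : List Int) (ts_tag_vocab : List (String × Int)) : Decidable (Pre_tag2ts ts_tag_sequence ts_tag_vocab) := by unfold Pre_tag2ts; infer_instance
def pvWitness_tag2ts : List Int × (List (String × Int)) := ([1, 2, 2, 0, 1], [("O", 0), ("B", 1), ("I", 2)])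

def Spec_tag2ts (ts_tag_sequence : List Int) (ts_tag_vocab : List (String × Int)) (out : List (Int × Int)) : Prop := out = tag2ts_alt ts_tag_sequence ts_tag_vocab
instance (ts_tag_sequence : List Int) (ts_tag_vocab : List (String × Int)) (out : List (Int × Int)) : Decidable (Spec_tag2ts ts_tag_sequence ts_tag_vocab out) := by unfold Spec_tag2ts; infer_instance

-- ===== CLAIM (what is proved, stated in full; the proofs are below) =====
def Claim_equal_tag2ts : Prop := ∀ (ts_tag_sequence : List Int) (ts_tag_vocab : List (String × Int)), Dom_tag2ts ts_tag_sequence ts_tag_vocab → Pre_tag2ts ts_tag_sequence ts_tag_vocab → Spec_tag2ts ts_tag_sequence ts_tag_vocab (tag2ts ts_tag_sequence ts_tag_vocab)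

-- ===== LEMMAS AND PROOFS =====

-- A's loop body, with the decoded name supplied alongside its index.
def pvStep (st : List (Int × Int) × Int × Int) (p : Int × String) : List (Int × Int) × Int × Int :=
  let acc := st.1
  let b := st.2.1
  let e := st.2.2
  if p.2 = "B" then
    if b ≠ -1 then
      (if p.1 - 1 ≥ b ∧ b > -1 then acc ++ [(b, p.1 - 1)] else acc, p.1, p.1)
    else (acc, p.1, p.1)
  else if p.2 = "O" then
    (if p.1 - 1 ≥ b ∧ b > -1 then acc ++ [(b, p.1 - 1)] else acc, (-1 : Int), (-1 : Int))
  else if p.2 = "I" then (acc, b, p.1)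
  else (acc, b, e)

-- A's trailing-span check.
def pvFin (st : List (Int × Int) × Int × Int) : List (Int × Int) :=
  if st.2.2 ≥ st.2.1 ∧ st.2.1 > -1 then st.1 ++ [(st.2.1, st.2.2)] else st.1

lemma pvStep_B {b : Int} (acc : List (Int × Int)) (e i : Int) (h : i - 1 ≥ b ∧ b > -1) :
    pvStep (acc, b, e) (i, "B") = (acc ++ [(b, i - 1)], i, i) := by
  have hb : b ≠ -1 := by omega
  simp [pvStep, hb, h]

lemma pvStep_B_closed (acc : List (Int × Int)) (e i : Int) :
    pvStep (acc, -1, e) (i, "B") = (acc, i, i) := by simp [pvStep]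

lemma pvStep_O {b : Int} (acc : List (Int × Int)) (e i : Int) (h : i - 1 ≥ b ∧ b > -1) :
    pvStep (acc, b, e) (i, "O") = (acc ++ [(b, i - 1)], -1, -1) := by simp [pvStep, h]

lemma pvStep_O_closed (acc : List (Int × Int)) (e i : Int) :
    pvStep (acc, -1, e) (i, "O") = (acc, -1, -1) := by simp [pvStep]

lemma pvStep_I (acc : List (Int × Int)) (b e i : Int) :
    pvStep (acc, b, e) (i, "I") = (acc, b, i) := by simp [pvStep]

lemma pvStep_other (acc : List (Int × Int)) (b e i : Int) {t : String}
    (hB : t ≠ "B") (hO : t ≠ "O") (hI : t ≠ "I") :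
    pvStep (acc, b, e) (i, t) = (acc, b, e) := by simp [pvStep, hB, hO, hI]

-- The core invariant: from a closed state (begin = -1, any end) A's remaining loop plus trailing
-- check appends pvAltGo of the rest; from an open state (0 ≤ begin ≤ end < next index) it appends
-- pvOpen begin end of the rest.
lemma pvMain (names : List String) : ∀ (s : Int), 0 ≤ s →
    (∀ (acc : List (Int × Int)) (e : Int),
      pvFin ((PySem.List.enumerate names s).foldl pvStep (acc, -1, e))
        = acc ++ pvAltGo (PySem.List.enumerate names s)) ∧
    (∀ (acc : List (Int × Int)) (b e : Int), 0 ≤ b → b ≤ e → e < s →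
      pvFin ((PySem.List.enumerate names s).foldl pvStep (acc, b, e))
        = acc ++ pvOpen b e (PySem.List.enumerate names s)) := by
  induction names with
  | nil =>
    intro s hs
    constructor
    · intro acc e
      simp [PySem.List.enumerate_nil, pvFin, pvAltGo]
    · intro acc b e hb hbe hes
      simp [PySem.List.enumerate_nil, pvFin, pvOpen]
      omega
  | cons t tl ih =>
    intro s hs
    have ih' := ih (s + 1) (by omega)
    constructor
    · intro acc e
      rw [PySem.List.enumerate_cons, List.foldl_cons]
      by_cases hB : t = "B"
      · subst hB
        rw [pvStep_B_closed, (ih'.2) acc s s hs le_rfl (by omega)]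
        simp [pvAltGo]
      · by_cases hO : t = "O"
        · subst hO
          rw [pvStep_O_closed, (ih'.1) acc (-1)]
          simp [pvAltGo, hB]
        · by_cases hI : t = "I"
          · subst hI
            rw [pvStep_I, (ih'.1) acc s]
            simp [pvAltGo, hB]
          · rw [pvStep_other acc (-1) e s hB hO hI, (ih'.1) acc e]
            simp [pvAltGo, hB]
    · intro acc b e hb hbe hes
      rw [PySem.List.enumerate_cons, List.foldl_cons]
      by_cases hB : t = "B"
      · subst hB
        rw [pvStep_B acc e s ⟨by omega, by omega⟩,
          (ih'.2) (acc ++ [(b, s - 1)]) s s hs le_rfl (by omega)]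
        simp [pvOpen]
      · by_cases hO : t = "O"
        · subst hO
          rw [pvStep_O acc e s ⟨by omega, by omega⟩, (ih'.1) (acc ++ [(b, s - 1)]) (-1)]
          simp [pvOpen, hB]
        · by_cases hI : t = "I"
          · subst hI
            rw [pvStep_I, (ih'.2) acc b s hb (by omega) (by omega)]
            simp [pvOpen, hB, hO]
          · rw [pvStep_other acc b e s hB hO hI, (ih'.2) acc b e hb hbe (by omega)]
            simp [pvOpen, hB, hO, hI]

-- A's indexed loop over range(n) is pvStep folded over the enumerated decoded names.
lemma tag2ts_eq_fold (ts_tag_sequence : List Int) (ts_tag_vocab : List (String × Int)) :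
    tag2ts ts_tag_sequence ts_tag_vocab
      = pvFin ((PySem.List.enumerate
            (ts_tag_sequence.map (fun t =>
              PySem.Dict.getD
                (ts_tag_vocab.foldl (fun d kv => d.insert kv.2 kv.1) PySem.Dict.empty) t ""))
            0).foldl pvStep ([], -1, -1)) := by
  have h1 : tag2ts ts_tag_sequence ts_tag_vocab
      = pvFin (List.foldl
          (fun st i => pvStep st (i,
            PySem.Dict.getD
              (ts_tag_vocab.foldl (fun d kv => d.insert kv.2 kv.1) PySem.Dict.empty)
              (PySem.List.pyGetD ts_tag_sequence i 0) ""))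
          ([], -1, -1) (PySem.List.pyRange 0 (PySem.List.len ts_tag_sequence) 1)) := rfl
  rw [h1]
  congr 1
  rw [PySem.List.enumerate_eq_map_pyRange _ "", List.foldl_map]
  have hlen : PySem.List.len (ts_tag_sequence.map (fun t =>
      PySem.Dict.getD
        (ts_tag_vocab.foldl (fun d kv => d.insert kv.2 kv.1) PySem.Dict.empty) t ""))
      = PySem.List.len ts_tag_sequence := by
    simp [PySem.List.len]
  rw [hlen]
  apply PySem.List.foldl_congr_mem
  intro acc i hi
  have hi' := (PySem.List.mem_pyRange_one).1 hi
  have h0 : (0 : Int) ≤ i := hi'.1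
  have h1' : i < (ts_tag_sequence.length : Int) := by
    simpa [PySem.List.len] using hi'.2
  congr 1
  rw [PySem.List.pyGetD_eq_getElem _ "" h0 (by simpa using h1'),
    PySem.List.pyGetD_eq_getElem _ 0 h0 h1']
  simp

-- ===== VERDICT (by name: the statement is the Claim_ definition above) =====
theorem tag2ts_spec : Claim_equal_tag2ts := by
  intro seq vocab _hdom _hpre
  unfold Spec_tag2ts tag2ts_alt
  rw [tag2ts_eq_fold]
  exact (pvMain _ 0 le_rfl).1 [] (-1)
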